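-- pv_equiv track=rewrite | github.com/Budder67/Budder67.github.io | project 5/proj5.py | stanza_and_lines
-- ===== SOURCE A (Python) =====
-- from typing import List, Tuple
--
-- def stanza_and_lines(text: str) -> Tuple[List[List[str]], List[str]]:
-- 	# Split stanzas by empty lines, lines by newline
-- 	raw_lines = [l.rstrip() for l in text.splitlines()]
-- 	stanzas: List[List[str]] = []
-- 	cur: List[str] = []
-- 	for line in raw_lines:
-- 		if line.strip() == "":
-- 			if cur:
-- 				stanzas.append(cur)
-- 				cur = []
-- 		else:
-- 			cur.append(line)
-- 	if cur:
-- 		stanzas.append(cur)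
-- 	# Flatten lines (exclude blank lines)
-- 	lines = [ln for stanza in stanzas for ln in stanza]
-- 	return stanzas, lines
-- ===== SOURCE B (Python) =====
-- from typing import List, Tuple
--
-- def stanza_and_lines(text: str) -> Tuple[List[List[str]], List[str]]:
-- 	# Two-pointer scan: skip blank lines; for each non-blank line, find the end
-- 	# of its run and slice the whole stanza out at once.
-- 	raw = [l.rstrip() for l in text.splitlines()]
-- 	n = len(raw)
-- 	stanzas: List[List[str]] = []
-- 	i = 0
-- 	while i < n:
-- 		if raw[i].strip() == "":
-- 			i += 1
-- 		else:
-- 			j = i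
-- 			while j < n and raw[j].strip() != "":
-- 				j += 1
-- 			stanzas.append(raw[i:j])
-- 			i = j
-- 	lines = [ln for stanza in stanzas for ln in stanza]
-- 	return stanzas, lines
-- ===== Notes on version B (the rewrite author's own statement) =====
-- stated objective: alternative
-- what changed: Replaces A's flush-accumulator fold (growing a cur list and flushing it on blank lines) with a two-pointer scan that skips blank lines and slices each maximal non-blank run out of raw_lines in one step.
import Mathlib
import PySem

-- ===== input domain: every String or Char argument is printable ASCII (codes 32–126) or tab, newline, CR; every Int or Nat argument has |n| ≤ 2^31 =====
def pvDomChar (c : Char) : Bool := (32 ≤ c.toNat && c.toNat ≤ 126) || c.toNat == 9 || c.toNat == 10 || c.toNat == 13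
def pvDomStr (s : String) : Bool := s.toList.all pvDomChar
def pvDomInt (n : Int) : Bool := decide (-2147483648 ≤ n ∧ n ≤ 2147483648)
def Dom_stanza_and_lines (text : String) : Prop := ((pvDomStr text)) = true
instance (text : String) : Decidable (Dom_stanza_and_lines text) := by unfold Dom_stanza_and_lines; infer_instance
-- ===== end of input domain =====

-- B replaces A's flush-accumulator loop with a two-pointer scan that slices each
-- maximal non-blank run out of raw_lines at once (alternative decomposition, same cost).

-- ===== PORT A =====
def stanza_and_lines (text : String) : List (List String) × List String :=
  let raw_lines := (PySem.Str.splitlines text).map PySem.Str.rstrip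
  let sc := raw_lines.foldl
    (fun (sc : List (List String) × List String) line =>
      if PySem.Str.strip line == "" then
        if sc.2 ≠ [] then (sc.1 ++ [sc.2], []) else sc
      else (sc.1, sc.2 ++ [line]))
    ([], [])
  let stanzas := if sc.2 ≠ [] then sc.1 ++ [sc.2] else sc.1
  (stanzas, stanzas.flatMap id)

-- ===== PORT B =====
-- inner `while j < n and raw[j].strip() != "": j += 1`
def pvRunEnd (raw : List String) (j : Nat) : Nat :=
  if h : j < raw.length then
    if PySem.Str.strip (raw[j]'h) == "" then j
    else pvRunEnd raw (j + 1)
  else j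
termination_by raw.length - j

-- needed by pvScan's termination proof
theorem le_pvRunEnd (raw : List String) (j : Nat) : j ≤ pvRunEnd raw j := by
  unfold pvRunEnd
  split
  · split
    · exact Nat.le_refl j
    · have := le_pvRunEnd raw (j + 1); omega
  · exact Nat.le_refl j
termination_by raw.length - j

-- outer `while i < n:` loop of B
def pvScan (raw : List String) (i : Nat) (stanzas : List (List String)) : List (List String) :=
  if h : i < raw.length then
    if PySem.Str.strip (raw[i]'h) == "" then pvScan raw (i + 1) stanzas
    else pvScan raw (pvRunEnd raw i)
           (stanzas ++ [PySem.List.slice raw (some (i : Int)) (some ((pvRunEnd raw i : Nat) : Int))])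
  else stanzas
termination_by raw.length - i
decreasing_by
  · omega
  · have h1 : i + 1 ≤ pvRunEnd raw (i + 1) := le_pvRunEnd raw (i + 1)
    have h2 : pvRunEnd raw i = pvRunEnd raw (i + 1) := by
      conv_lhs => rw [pvRunEnd]
      simp_all
    omega

def stanza_and_lines_alt (text : String) : List (List String) × List String :=
  let raw := (PySem.Str.splitlines text).map PySem.Str.rstrip
  let stanzas := pvScan raw 0 []
  (stanzas, stanzas.flatMap id)

-- ===== PRECONDITION & SPEC =====
def Spec_stanza_and_lines (text : String) (out : List (List String) × List String) : Prop := out = stanza_and_lines_alt text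
instance (text : String) (out : List (List String) × List String) : Decidable (Spec_stanza_and_lines text out) := by unfold Spec_stanza_and_lines; infer_instance

-- ===== CLAIM (what is proved, stated in full; the proofs are below) =====
def Claim_equal_stanza_and_lines : Prop := ∀ (text : String), Dom_stanza_and_lines text → Spec_stanza_and_lines text (stanza_and_lines text)

-- ===== LEMMAS AND PROOFS =====

-- the "non-blank line" predicate both programs branch on
def pvNB (l : String) : Bool := !(PySem.Str.strip l == "")

-- clean recursive characterisation: the maximal non-blank runs of a line list
def pvChunks : List String → List (List String)
  | [] => []
  | l :: ls =>
    if PySem.Str.strip l == "" then pvChunks ls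
    else (l :: ls.takeWhile pvNB) :: pvChunks (ls.dropWhile pvNB)
termination_by ls => ls.length
decreasing_by
  · simp
  · have := List.length_dropWhile_le pvNB ls; simp; omega

theorem pvChunks_eq (ls : List String) :
    pvChunks ls = (if ls.takeWhile pvNB = [] then [] else [ls.takeWhile pvNB]) ++ pvChunks (ls.dropWhile pvNB) := by
  cases ls with
  | nil => simp [pvChunks]
  | cons l ls =>
    by_cases hb : PySem.Str.strip l == ""
    · have : pvNB l = false := by simp [pvNB, hb]
      simp [pvChunks, hb, List.takeWhile_cons, List.dropWhile_cons, this]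
    · have : pvNB l = true := by simp [pvNB]; simpa using hb
      simp [pvChunks, hb, List.takeWhile_cons, List.dropWhile_cons, this]

-- proof-side names for A's fold step and final flush
def pvStepA (sc : List (List String) × List String) (line : String) : List (List String) × List String :=
  if PySem.Str.strip line == "" then
    if sc.2 ≠ [] then (sc.1 ++ [sc.2], []) else sc
  else (sc.1, sc.2 ++ [line])

def pvFin (sc : List (List String) × List String) : List (List String) :=
  if sc.2 ≠ [] then sc.1 ++ [sc.2] else sc.1

-- A's fold invariant
theorem pvFoldA (raw : List String) (stanzas : List (List String)) (cur : List String) :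
    pvFin (raw.foldl pvStepA (stanzas, cur))
    = stanzas ++ (if cur ++ raw.takeWhile pvNB = [] then [] else [cur ++ raw.takeWhile pvNB])
        ++ pvChunks (raw.dropWhile pvNB) := by
  induction raw generalizing stanzas cur with
  | nil =>
    simp only [List.foldl_nil, List.takeWhile_nil, List.dropWhile_nil, List.append_nil, pvChunks,
      pvFin]
    split_ifs with h1 h2 <;> simp_all
  | cons l ls ih =>
    by_cases hb : (PySem.Str.strip l == "") = true
    · have hnb : pvNB l = false := by simp [pvNB, hb]
      have htw : List.takeWhile pvNB (l :: ls) = [] := by simp [List.takeWhile_cons, hnb]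
      have hdw : List.dropWhile pvNB (l :: ls) = l :: ls := by simp [List.dropWhile_cons, hnb]
      have hch : pvChunks (l :: ls) = pvChunks ls := by simp [pvChunks, hb]
      rw [List.foldl_cons]
      simp only [htw, List.append_nil, hdw, hch]
      by_cases hc : cur = []
      · subst hc
        have hstep : pvStepA (stanzas, []) l = (stanzas, []) := by simp [pvStepA, hb]
        rw [hstep, ih stanzas [], if_pos rfl, pvChunks_eq ls]
        simp [List.append_assoc]
      · have hstep : pvStepA (stanzas, cur) l = (stanzas ++ [cur], []) := by
          simp [pvStepA, hb, hc]
        rw [hstep, ih (stanzas ++ [cur]) [], if_neg hc, pvChunks_eq ls]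
        simp [List.append_assoc]
    · have hnb : pvNB l = true := by simp [pvNB]; simpa using hb
      have htw : List.takeWhile pvNB (l :: ls) = l :: List.takeWhile pvNB ls := by
        simp [List.takeWhile_cons, hnb]
      have hdw : List.dropWhile pvNB (l :: ls) = List.dropWhile pvNB ls := by
        simp [List.dropWhile_cons, hnb]
      have hstep : pvStepA (stanzas, cur) l = (stanzas, cur ++ [l]) := by simp [pvStepA, hb]
      rw [List.foldl_cons, hstep, ih stanzas (cur ++ [l])]
      simp [htw, hdw, List.append_assoc]

theorem pvRunEnd_le_length (raw : List String) (j : Nat) (hj : j ≤ raw.length) :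
    pvRunEnd raw j ≤ raw.length := by
  unfold pvRunEnd
  split
  · split
    · omega
    · exact pvRunEnd_le_length raw (j + 1) (by omega)
  · exact hj
termination_by raw.length - j

theorem pvRunEnd_eq (raw : List String) (j : Nat) (hj : j ≤ raw.length) :
    pvRunEnd raw j = j + ((raw.drop j).takeWhile pvNB).length := by
  unfold pvRunEnd
  split
  · rename_i h
    have hdrop : raw.drop j = raw[j] :: raw.drop (j + 1) := List.drop_eq_getElem_cons h
    split
    · rename_i hb
      have hnb : pvNB raw[j] = false := by simp [pvNB, hb]
      rw [hdrop, List.takeWhile_cons, hnb]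
      simp
    · rename_i hb
      have hnb : pvNB raw[j] = true := by simp [pvNB]; simpa using hb
      rw [pvRunEnd_eq raw (j + 1) (by omega), hdrop, List.takeWhile_cons, hnb]
      simp; omega
  · rename_i h
    have : raw.drop j = [] := List.drop_eq_nil_of_le (by omega)
    simp [this]
termination_by raw.length - j

theorem pv_take_takeWhile {α : Type} (p : α → Bool) (l : List α) :
    l.take (l.takeWhile p).length = l.takeWhile p := by
  induction l with
  | nil => simp
  | cons a l ih =>
    by_cases h : p a
    · simp [List.takeWhile_cons, h, List.take_succ_cons, ih]
    · simp [List.takeWhile_cons, h]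

theorem pv_drop_takeWhile {α : Type} (p : α → Bool) (l : List α) :
    l.drop (l.takeWhile p).length = l.dropWhile p := by
  induction l with
  | nil => simp
  | cons a l ih =>
    by_cases h : p a
    · simp [List.takeWhile_cons, h, List.dropWhile_cons, ih]
    · simp [List.takeWhile_cons, h, List.dropWhile_cons]

theorem pvScan_eq (raw : List String) (i : Nat) (stanzas : List (List String)) (hi : i ≤ raw.length) :
    pvScan raw i stanzas = stanzas ++ pvChunks (raw.drop i) := by
  unfold pvScan
  split
  · rename_i h
    have hdrop : raw.drop i = raw[i] :: raw.drop (i + 1) := List.drop_eq_getElem_cons h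
    split
    · rename_i hb
      have hch : pvChunks (raw.drop i) = pvChunks (raw.drop (i + 1)) := by
        rw [hdrop]; simp [pvChunks, hb, -List.getElem_cons_drop]
      rw [pvScan_eq raw (i + 1) stanzas (by omega), hch]
    · rename_i hb
      have hnb : pvNB raw[i] = true := by simp [pvNB]; simpa using hb
      have hre := pvRunEnd_eq raw i hi
      have hle : pvRunEnd raw i ≤ raw.length := pvRunEnd_le_length raw i hi
      rw [pvScan_eq raw (pvRunEnd raw i)
            (stanzas ++ [PySem.List.slice raw (some (i : Int)) (some ((pvRunEnd raw i : Nat) : Int))]) hle]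
      have hslice : PySem.List.slice raw (some (i : Int)) (some ((pvRunEnd raw i : Nat) : Int))
          = (raw.drop i).takeWhile pvNB := by
        rw [PySem.List.slice_natCast, hre]
        have he : i + ((raw.drop i).takeWhile pvNB).length - i = ((raw.drop i).takeWhile pvNB).length := by omega
        rw [he, pv_take_takeWhile]
      have hdropj : raw.drop (pvRunEnd raw i) = (raw.drop i).dropWhile pvNB := by
        rw [hre, ← List.drop_drop, pv_drop_takeWhile]
      have hchunks : pvChunks (raw.drop i)
          = ((raw.drop i).takeWhile pvNB) :: pvChunks ((raw.drop i).dropWhile pvNB) := by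
        rw [hdrop]
        simp [pvChunks, hb, hnb, List.takeWhile_cons, List.dropWhile_cons,
          -List.getElem_cons_drop]
      rw [hslice, hdropj, hchunks]
      simp
  · rename_i h
    have hnil : raw.drop i = [] := List.drop_eq_nil_of_le (by omega)
    simp [hnil, pvChunks]
termination_by raw.length - i
decreasing_by
  all_goals first
    | omega
    | (have h1 : i + 1 ≤ pvRunEnd raw (i + 1) := le_pvRunEnd raw (i + 1)
       have h2 : pvRunEnd raw i = pvRunEnd raw (i + 1) := by
         conv_lhs => rw [pvRunEnd]
         simp_all
       omega)

-- ===== VERDICT (by name: the statement is the Claim_ definition above) =====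
theorem stanza_and_lines_spec : Claim_equal_stanza_and_lines := by
  intro text _
  unfold Spec_stanza_and_lines stanza_and_lines stanza_and_lines_alt
  have hstep : (fun (sc : List (List String) × List String) line =>
      if PySem.Str.strip line == "" then
        if sc.2 ≠ [] then (sc.1 ++ [sc.2], []) else sc
      else (sc.1, sc.2 ++ [line])) = pvStepA := rfl
  simp only [hstep]
  have hA := pvFoldA ((PySem.Str.splitlines text).map PySem.Str.rstrip) [] []
  have hB := pvScan_eq ((PySem.Str.splitlines text).map PySem.Str.rstrip) 0 [] (by omega)
  simp only [List.nil_append, List.drop_zero] at hA hB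
  rw [← pvChunks_eq] at hA
  show (pvFin _, (pvFin _).flatMap id) = _
  rw [hA, hB]
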